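-- pv_equiv track=rewrite | github.com/yonggqiii/kattis | cs1010e/favourable/favourable_solution.py | ways_to_get_there
-- ===== SOURCE A (Python) =====
-- def ways_to_get_there(elem: any, prevs: dict, stored: dict) -> int:
--     '''
--     Use DP to solve problem.
--     Ways to get to elem = sum of the ways to get to each of elem's
--     previous nodes.
--     '''
--     if elem == 1:
--         return 1
--     if elem in stored:
--         return stored[elem]
--
--     # Store the result for elem if it has not been computed already.
--     stored[elem] = sum([ways_to_get_there(i, prevs, stored)
--         for i in prevs[elem]])
--     return stored[elem]
-- ===== SOURCE B (Python) =====
-- def ways_to_get_there(elem, prevs, stored):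
--     '''Iterative round-based DP: instead of recursing from elem, repeatedly
--     sweep the prevs table and resolve every node whose predecessors are all
--     known, until elem is resolved or a sweep makes no progress.
--     (Return-value equivalent to the recursive version; it may write memo
--     entries for additional nodes of prevs into stored.)'''
--     if elem == 1:
--         return 1
--     if elem in stored:
--         return stored[elem]
--     changed = True
--     while changed and elem not in stored:
--         changed = False
--         for node, preds in prevs.items():
--             if node != 1 and node not in stored and all(p == 1 or p in stored for p in preds):
--                 stored[node] = sum(1 if p == 1 else stored[p] for p in preds)
--                 changed = True
--     return stored[elem]
-- ===== Notes on version B (the rewrite author's own statement) =====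
-- stated objective: alternative
-- what changed: Replaces A's demand-driven recursive memoization by a non-recursive round-based DP: repeated sweeps over the prevs table resolve every node whose predecessors are all known, until elem is resolved or a sweep makes no progress (no recursion, so no recursion-depth limit).
import Mathlib
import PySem

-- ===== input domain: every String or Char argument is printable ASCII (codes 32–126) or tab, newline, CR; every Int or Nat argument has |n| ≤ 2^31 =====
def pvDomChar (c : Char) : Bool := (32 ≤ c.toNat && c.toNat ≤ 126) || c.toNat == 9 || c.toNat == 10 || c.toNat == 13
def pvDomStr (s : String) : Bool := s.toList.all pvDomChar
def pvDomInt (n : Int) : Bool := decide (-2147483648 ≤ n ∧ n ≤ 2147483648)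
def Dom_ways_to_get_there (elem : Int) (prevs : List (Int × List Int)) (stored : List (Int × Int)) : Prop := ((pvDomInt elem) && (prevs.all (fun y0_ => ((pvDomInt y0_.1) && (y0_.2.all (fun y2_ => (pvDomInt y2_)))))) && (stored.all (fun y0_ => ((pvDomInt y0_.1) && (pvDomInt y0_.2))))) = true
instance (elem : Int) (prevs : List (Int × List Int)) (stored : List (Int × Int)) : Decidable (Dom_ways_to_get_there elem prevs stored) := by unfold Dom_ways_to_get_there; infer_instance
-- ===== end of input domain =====

-- B replaces A's demand-driven recursive memoization by non-recursive sweeps over the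
-- prevs table that resolve every node whose predecessors are all known, until elem is
-- resolved or a sweep makes no progress; only RETURN values are compared here: both
-- mutate `stored`, and B may write memo entries for nodes A's recursion never visits.

-- ===== PORT A =====
-- Recursive memoized DP, threading the mutable `stored` dict through the calls.
-- `fuel` is only a totality guard: under Pre_ the recursion depth is bounded by the
-- closure rank of the node, which is at most `prevs.length`, so fuel never runs out.
def waysGoA (fuel : Nat) (elem : Int) (prevs : PySem.Dict Int (List Int))
    (stored : PySem.Dict Int Int) : Int × PySem.Dict Int Int :=
  match fuel with
  | 0 => (0, stored)          -- fuel exhausted: unreachable under Pre_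
  | fuel + 1 =>
    if elem = 1 then (1, stored)
    else
      match stored.get? elem with
      | some v => (v, stored)
      | none =>
        -- prevs[elem]: a missing key (Python KeyError) is excluded by Pre_
        let ps := prevs.getD elem []
        -- sum([ways_to_get_there(i, prevs, stored) for i in prevs[elem]])
        let r := ps.foldl (fun acc p =>
            let res := waysGoA fuel p prevs acc.2
            (acc.1 + res.1, res.2)) ((0 : Int), stored)
        -- stored[elem] = r.1; return stored[elem] (= r.1, just written)
        (r.1, r.2.insert elem r.1)

def ways_to_get_there (elem : Int) (prevs : List (Int × List Int)) (stored : List (Int × Int)) : Int :=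
  (waysGoA (prevs.length + 1) elem (PySem.Dict.mk prevs) (PySem.Dict.mk stored)).1

-- ===== PORT B =====
-- value of a known predecessor: `1 if p == 1 else stored[p]` (presence guaranteed by the all() check)
def pvValB (st : PySem.Dict Int Int) (p : Int) : Int :=
  if p = 1 then 1 else st.getD p 0

-- one `for node, preds in prevs.items()` step of a sweep; the Bool is the `changed` flag
def pvStepB (acc : PySem.Dict Int Int × Bool) (e : Int × List Int) :
    PySem.Dict Int Int × Bool :=
  if e.1 ≠ 1 ∧ acc.1.get? e.1 = none ∧ (∀ q ∈ e.2, q = 1 ∨ acc.1.get? q ≠ none) then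
    (acc.1.insert e.1 ((e.2.map (fun q => pvValB acc.1 q)).sum), true)
  else acc

-- one full sweep of the `for` loop, starting with `changed = False`
def pvRoundB (prevs : List (Int × List Int)) (st : PySem.Dict Int Int) :
    PySem.Dict Int Int × Bool :=
  prevs.foldl pvStepB (st, false)

-- the `while changed and elem not in stored` loop; each productive sweep stores a new
-- prevs key, so `prevs.length + 1` sweeps of fuel are never exhausted
def pvLoopB (prevs : List (Int × List Int)) (elem : Int) (fuel : Nat)
    (st : PySem.Dict Int Int) : PySem.Dict Int Int :=
  match fuel with
  | 0 => st
  | fuel + 1 =>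
    if st.get? elem = none then
      let r := pvRoundB prevs st
      if r.2 then pvLoopB prevs elem fuel r.1 else r.1
    else st

def ways_to_get_there_alt (elem : Int) (prevs : List (Int × List Int)) (stored : List (Int × Int)) : Int :=
  if elem = 1 then 1
  else
    match (PySem.Dict.mk stored).get? elem with
    | some v => v
    | none =>
      -- return stored[elem] (a missing key raises KeyError in both programs; excluded by Pre_)
      (pvLoopB prevs elem (prevs.length + 1) (PySem.Dict.mk stored)).getD elem 0

-- ===== PRECONDITION & SPEC =====
-- the resolvability closure of the graph: level 0 holds 1 and the initially stored
-- keys; level k+1 adds every prevs key all of whose predecessors lie in level k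
def pvRk (prevs : List (Int × List Int)) (stored : List (Int × Int)) : Nat → List Int
  | 0 => 1 :: stored.map Prod.fst
  | k + 1 => pvRk prevs stored k ++
      (prevs.filter (fun e => e.2.all (fun q => decide (q ∈ pvRk prevs stored k)))).map Prod.fst

-- Pre_ holds exactly where the Python A returns: on the two fast paths (elem == 1 or elem
-- already stored), and otherwise when elem lies in the resolvability closure — i.e. its
-- dependency closure is acyclic with no missing keys; outside it A raises KeyError or
-- RecursionError (and B raises KeyError).  The last disjunct also requires the prevs
-- association list to carry no duplicate keys: a Python dict always satisfies this, so a
-- duplicate-key list encodes no Python input (an artefact of the assoc-list encoding).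
def Pre_ways_to_get_there (elem : Int) (prevs : List (Int × List Int)) (stored : List (Int × Int)) : Prop :=
  elem = 1 ∨ elem ∈ stored.map Prod.fst ∨
    ((prevs.map Prod.fst).Nodup ∧ elem ∈ pvRk prevs stored prevs.length)
instance (elem : Int) (prevs : List (Int × List Int)) (stored : List (Int × Int)) : Decidable (Pre_ways_to_get_there elem prevs stored) := by unfold Pre_ways_to_get_there; infer_instance

def pvWitness_ways_to_get_there : Int × (List (Int × List Int)) × (List (Int × Int)) :=
  (3, [(2, [1, 1]), (3, [1, 2])], [])

def Spec_ways_to_get_there (elem : Int) (prevs : List (Int × List Int)) (stored : List (Int × Int)) (out : Int) : Prop := out = ways_to_get_there_alt elem prevs stored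
instance (elem : Int) (prevs : List (Int × List Int)) (stored : List (Int × Int)) (out : Int) : Decidable (Spec_ways_to_get_there elem prevs stored out) := by unfold Spec_ways_to_get_there; infer_instance

-- ===== CLAIM (what is proved, stated in full; the proofs are below) =====
def Claim_equal_ways_to_get_there : Prop := ∀ (elem : Int) (prevs : List (Int × List Int)) (stored : List (Int × Int)), Dom_ways_to_get_there elem prevs stored → Pre_ways_to_get_there elem prevs stored → Spec_ways_to_get_there elem prevs stored (ways_to_get_there elem prevs stored)

-- ===== LEMMAS AND PROOFS =====

-- ----- proof-side definitions -----
-- the canonical value of a node (fuel-bounded unfolding of the DP equations)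
def pvValF (prevs : List (Int × List Int)) (stored : List (Int × Int)) : Nat → Int → Int
  | 0, _ => 0
  | f + 1, p =>
    if p = 1 then 1 else
      match (PySem.Dict.mk stored).get? p with
      | some v => v
      | none =>
        match (PySem.Dict.mk prevs).get? p with
        | some ps => (ps.map (fun q => pvValF prevs stored f q)).sum
        | none => 0

def pvVal (prevs : List (Int × List Int)) (stored : List (Int × Int)) (p : Int) : Int :=
  pvValF prevs stored (2 * prevs.length + 2) p

-- memo-table invariant shared by both ports: every entry (other than an inert key-1
-- entry) carries the canonical value of a resolvable node, and the initial entries stay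
def pvInv (prevs : List (Int × List Int)) (stored : List (Int × Int))
    (st : PySem.Dict Int Int) : Prop :=
  (∀ q v, st.get? q = some v → q ≠ 1 →
      v = pvVal prevs stored q ∧ q ∈ pvRk prevs stored prevs.length) ∧
  (∀ q v, (PySem.Dict.mk stored).get? q = some v → st.get? q = some v)

-- coverage: the table has reached level j of the closure
def pvCov (prevs : List (Int × List Int)) (stored : List (Int × Int)) (j : Nat)
    (st : PySem.Dict Int Int) : Prop :=
  ∀ x, x ∈ pvRk prevs stored j → x = 1 ∨ st.get? x ≠ none

-- ----- dictionary basics -----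
lemma pv_mk_none_iff {ν : Type} (l : List (Int × ν)) (k : Int) :
    (PySem.Dict.mk l).get? k = none ↔ k ∉ l.map Prod.fst := by
  rw [PySem.Dict.get?_eq_none_iff_not_mem_keys]; simp [pysem]

lemma pv_mem_fst_get? {ν : Type} (l : List (Int × ν)) (k : Int) (h : k ∈ l.map Prod.fst) :
    ∃ v, (PySem.Dict.mk l).get? k = some v := by
  cases hg : (PySem.Dict.mk l).get? k with
  | none => exact absurd ((pv_mk_none_iff l k).1 hg) (by simpa using h)
  | some v => exact ⟨v, rfl⟩

lemma pv_get?_mem_fst {ν : Type} (l : List (Int × ν)) (k : Int) (v : ν)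
    (h : (PySem.Dict.mk l).get? k = some v) : k ∈ l.map Prod.fst := by
  by_contra hm
  rw [(pv_mk_none_iff l k).2 hm] at h
  cases h

lemma pv_get?_first {ν : Type} (l : List (Int × ν)) (hnd : (l.map Prod.fst).Nodup)
    (e : Int × ν) (he : e ∈ l) : (PySem.Dict.mk l).get? e.1 = some e.2 := by
  have hk : ((PySem.Dict.mk l).keys).Nodup := by simpa [PySem.Dict.keys] using hnd
  have hm : (e.1, e.2) ∈ (PySem.Dict.mk l).items := by simpa using he
  exact PySem.Dict.get?_of_mem_items _ hm hk

-- ----- closure lemmas -----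
lemma pv_mem_R_succ (prevs : List (Int × List Int)) (stored : List (Int × Int))
    (k : Nat) (x : Int) :
    x ∈ pvRk prevs stored (k + 1) ↔
      x ∈ pvRk prevs stored k ∨
        ∃ e ∈ prevs, e.1 = x ∧ ∀ q ∈ e.2, q ∈ pvRk prevs stored k := by
  simp only [pvRk, List.mem_append, List.mem_map, List.mem_filter, List.all_eq_true,
    decide_eq_true_eq]
  constructor
  · rintro (h | ⟨e, ⟨he, hq⟩, hex⟩)
    · exact Or.inl h
    · exact Or.inr ⟨e, he, hex, hq⟩
  · rintro (h | ⟨e, he, hex, hq⟩)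
    · exact Or.inl h
    · exact Or.inr ⟨e, ⟨he, hq⟩, hex⟩

lemma pv_R_mono (prevs : List (Int × List Int)) (stored : List (Int × Int))
    (k : Nat) (x : Int) (h : x ∈ pvRk prevs stored k) : x ∈ pvRk prevs stored (k + 1) :=
  (pv_mem_R_succ prevs stored k x).2 (Or.inl h)

lemma pv_R_mono_le (prevs : List (Int × List Int)) (stored : List (Int × Int))
    {j m : Nat} (h : j ≤ m) (x : Int) (hx : x ∈ pvRk prevs stored j) :
    x ∈ pvRk prevs stored m := by
  induction m with
  | zero => have : j = 0 := by omega
            exact this ▸ hx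
  | succ m ih =>
    by_cases hjm : j = m + 1
    · exact hjm ▸ hx
    · exact pv_R_mono prevs stored m x (ih (by omega))

lemma pv_one_mem (prevs : List (Int × List Int)) (stored : List (Int × Int)) (k : Nat) :
    (1 : Int) ∈ pvRk prevs stored k :=
  pv_R_mono_le prevs stored (Nat.zero_le k) 1 (by simp [pvRk])

lemma pv_R_congr (prevs : List (Int × List Int)) (stored : List (Int × Int))
    {a b : Nat} (h : ∀ x, x ∈ pvRk prevs stored a ↔ x ∈ pvRk prevs stored b) :
    ∀ x, x ∈ pvRk prevs stored (a + 1) ↔ x ∈ pvRk prevs stored (b + 1) := by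
  intro x
  rw [pv_mem_R_succ, pv_mem_R_succ]
  constructor
  · rintro (hx | ⟨e, he, hex, hq⟩)
    · exact Or.inl ((h x).1 hx)
    · exact Or.inr ⟨e, he, hex, fun q hq' => (h q).1 (hq q hq')⟩
  · rintro (hx | ⟨e, he, hex, hq⟩)
    · exact Or.inl ((h x).2 hx)
    · exact Or.inr ⟨e, he, hex, fun q hq' => (h q).2 (hq q hq')⟩

lemma pv_R_fix_forever (prevs : List (Int × List Int)) (stored : List (Int × Int))
    {j : Nat} (hfix : ∀ x, x ∈ pvRk prevs stored (j + 1) ↔ x ∈ pvRk prevs stored j) :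
    ∀ m, j ≤ m → ∀ x, (x ∈ pvRk prevs stored m ↔ x ∈ pvRk prevs stored j) := by
  intro m
  induction m with
  | zero => intro h x
            have : j = 0 := by omega
            rw [this]
  | succ m ih =>
    intro h x
    by_cases hjm : j = m + 1
    · rw [hjm]
    · have hstep := pv_R_congr prevs stored (ih (by omega))
      exact (hstep x).trans (hfix x)

lemma pv_R_fix_exists (prevs : List (Int × List Int)) (stored : List (Int × Int)) :
    ∃ j, j ≤ prevs.length ∧
      ∀ x, x ∈ pvRk prevs stored (j + 1) ↔ x ∈ pvRk prevs stored j := by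
  by_contra h
  have h' : ∀ j, j ≤ prevs.length →
      ∃ x, x ∈ pvRk prevs stored (j + 1) ∧ x ∉ pvRk prevs stored j := by
    intro j hj
    by_contra hno
    apply h
    refine ⟨j, hj, fun x => ⟨fun hx => ?_, fun hx => pv_R_mono prevs stored j x hx⟩⟩
    by_contra hxo
    exact hno ⟨x, hx, hxo⟩
  have key : ∀ k, k ≤ prevs.length + 1 →
      k ≤ ((prevs.map Prod.fst).toFinset.filter
            (fun x => x ∈ pvRk prevs stored k)).card := by
    intro k
    induction k with
    | zero => intro _; exact Nat.zero_le _
    | succ k ih =>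
      intro hk
      obtain ⟨x, hx1⟩ := h' k (by omega)
      have hxkey : x ∈ prevs.map Prod.fst := by
        rcases (pv_mem_R_succ prevs stored k x).1 hx1.1 with h' | ⟨e, he, hex, _⟩
        · exact absurd h' hx1.2
        · exact hex ▸ List.mem_map_of_mem he
      have hss : (prevs.map Prod.fst).toFinset.filter
            (fun y => y ∈ pvRk prevs stored k) ⊂
          (prevs.map Prod.fst).toFinset.filter
            (fun y => y ∈ pvRk prevs stored (k + 1)) := by
        constructor
        · intro y hy
          rw [Finset.mem_filter] at hy ⊢
          exact ⟨hy.1, pv_R_mono prevs stored k y hy.2⟩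
        · intro hsub
          have := hsub (Finset.mem_filter.2 ⟨List.mem_toFinset.2 hxkey, hx1.1⟩)
          rw [Finset.mem_filter] at this
          exact hx1.2 this.2
      have hcard := Finset.card_lt_card hss
      have := ih (by omega)
      omega
  have h1 := key (prevs.length + 1) le_rfl
  have h2 : ((prevs.map Prod.fst).toFinset.filter
      (fun x => x ∈ pvRk prevs stored (prevs.length + 1))).card ≤
      (prevs.map Prod.fst).toFinset.card := Finset.card_filter_le _ _
  have h3 : (prevs.map Prod.fst).toFinset.card ≤ (prevs.map Prod.fst).length :=
    (prevs.map Prod.fst).toFinset_card_le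
  rw [List.length_map] at h3
  omega

lemma pv_R_to_N (prevs : List (Int × List Int)) (stored : List (Int × Int))
    (k : Nat) (x : Int) (hx : x ∈ pvRk prevs stored k) :
    x ∈ pvRk prevs stored prevs.length := by
  obtain ⟨j, hj, hfix⟩ := pv_R_fix_exists prevs stored
  by_cases hk : k ≤ prevs.length
  · exact pv_R_mono_le prevs stored hk x hx
  · have := (pv_R_fix_forever prevs stored hfix k (by omega) x).1 hx
    exact pv_R_mono_le prevs stored hj x this

lemma pv_R_closed (prevs : List (Int × List Int)) (stored : List (Int × Int))
    (e : Int × List Int) (he : e ∈ prevs)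
    (hq : ∀ q ∈ e.2, q ∈ pvRk prevs stored prevs.length) :
    e.1 ∈ pvRk prevs stored prevs.length :=
  pv_R_to_N prevs stored (prevs.length + 1) e.1
    ((pv_mem_R_succ prevs stored prevs.length e.1).2 (Or.inr ⟨e, he, rfl, hq⟩))

-- ----- canonical-value lemmas -----
lemma pv_valF_one (prevs : List (Int × List Int)) (stored : List (Int × Int)) (f : Nat) :
    pvValF prevs stored (f + 1) 1 = 1 := by simp [pvValF]

lemma pv_valF_stored (prevs : List (Int × List Int)) (stored : List (Int × Int))
    (f : Nat) (p : Int) (v : Int) (hp : p ≠ 1)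
    (h : (PySem.Dict.mk stored).get? p = some v) :
    pvValF prevs stored (f + 1) p = v := by
  simp [pvValF, hp, h]

lemma pv_val_one (prevs : List (Int × List Int)) (stored : List (Int × Int)) :
    pvVal prevs stored 1 = 1 := by
  unfold pvVal
  exact pv_valF_one prevs stored _

lemma pv_val_stored (prevs : List (Int × List Int)) (stored : List (Int × Int))
    (p : Int) (v : Int) (hp : p ≠ 1) (h : (PySem.Dict.mk stored).get? p = some v) :
    pvVal prevs stored p = v := by
  unfold pvVal
  exact pv_valF_stored prevs stored _ p v hp h

lemma pv_stab (prevs : List (Int × List Int)) (stored : List (Int × Int))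
    (hnd : (prevs.map Prod.fst).Nodup) :
    ∀ k x, x ∈ pvRk prevs stored k → ∀ f, k ≤ f →
      pvValF prevs stored (f + 1) x = pvValF prevs stored (k + 1) x := by
  intro k
  induction k with
  | zero =>
    intro x hx f _
    by_cases hx1 : x = 1
    · rw [hx1, pv_valF_one, pv_valF_one]
    · have hmem : x ∈ stored.map Prod.fst := by
        rcases (by simpa [pvRk] using hx : x = 1 ∨ x ∈ stored.map Prod.fst) with h | h
        · exact absurd h hx1
        · exact h
      obtain ⟨v, hv⟩ := pv_mem_fst_get? stored x hmem
      rw [pv_valF_stored prevs stored f x v hx1 hv,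
        pv_valF_stored prevs stored 0 x v hx1 hv]
  | succ k ih =>
    intro x hx f hf
    rcases (pv_mem_R_succ prevs stored k x).1 hx with hx' | ⟨e, he, hex, hq⟩
    · rw [ih x hx' f (by omega), ← ih x hx' (k + 1) (by omega)]
    · by_cases hx1 : x = 1
      · rw [hx1, pv_valF_one, pv_valF_one]
      · cases hst : (PySem.Dict.mk stored).get? x with
        | some v =>
          rw [pv_valF_stored prevs stored f x v hx1 hst,
            pv_valF_stored prevs stored (k + 1) x v hx1 hst]
        | none =>
          have hget : (PySem.Dict.mk prevs).get? x = some e.2 := by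
            rw [← hex]; exact pv_get?_first prevs hnd e he
          obtain ⟨f', rfl⟩ : ∃ f', f = f' + 1 := ⟨f - 1, by omega⟩
          simp only [pvValF, if_neg hx1, hst, hget]
          congr 1
          apply List.map_congr_left
          intro q hq'
          exact ih q (hq q hq') f' (by omega)

lemma pv_valF_succ (prevs : List (Int × List Int)) (stored : List (Int × Int))
    (f : Nat) (p : Int) :
    pvValF prevs stored (f + 1) p =
      if p = 1 then 1 else
        match (PySem.Dict.mk stored).get? p with
        | some v => v
        | none =>
          match (PySem.Dict.mk prevs).get? p with
          | some ps => (ps.map (fun q => pvValF prevs stored f q)).sum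
          | none => 0 := rfl

lemma pv_valF_node (prevs : List (Int × List Int)) (stored : List (Int × Int))
    (f : Nat) (p : Int) (ps : List Int) (hp1 : p ≠ 1)
    (hs : (PySem.Dict.mk stored).get? p = none)
    (hg : (PySem.Dict.mk prevs).get? p = some ps) :
    pvValF prevs stored (f + 1) p = (ps.map (fun q => pvValF prevs stored f q)).sum := by
  rw [pv_valF_succ, if_neg hp1, hs, hg]

lemma pv_val_unfold (prevs : List (Int × List Int)) (stored : List (Int × Int))
    (hnd : (prevs.map Prod.fst).Nodup) (p : Int) (e : Int × List Int)
    (he : e ∈ prevs) (hex : e.1 = p) (hp1 : p ≠ 1)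
    (hs : (PySem.Dict.mk stored).get? p = none)
    (hres : ∀ q ∈ e.2, q ∈ pvRk prevs stored prevs.length) :
    pvVal prevs stored p = (e.2.map (pvVal prevs stored)).sum := by
  have hget : (PySem.Dict.mk prevs).get? p = some e.2 := by
    rw [← hex]; exact pv_get?_first prevs hnd e he
  obtain ⟨j, hj, hfix⟩ := pv_R_fix_exists prevs stored
  rw [show pvVal prevs stored p
      = pvValF prevs stored ((2 * prevs.length + 1) + 1) p from rfl,
    pv_valF_node prevs stored (2 * prevs.length + 1) p e.2 hp1 hs hget]
  refine congrArg List.sum (List.map_congr_left ?_)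
  intro q hq
  have hqj : q ∈ pvRk prevs stored j :=
    (pv_R_fix_forever prevs stored hfix prevs.length hj q).1 (hres q hq)
  calc pvValF prevs stored (2 * prevs.length + 1) q
      = pvValF prevs stored (j + 1) q :=
        pv_stab prevs stored hnd j q hqj (2 * prevs.length) (by omega)
    _ = pvValF prevs stored (2 * prevs.length + 1 + 1) q :=
        (pv_stab prevs stored hnd j q hqj (2 * prevs.length + 1) (by omega)).symm
    _ = pvVal prevs stored q := rfl

-- ----- invariant at the initial table -----
lemma pv_inv_init (prevs : List (Int × List Int)) (stored : List (Int × Int)) :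
    pvInv prevs stored (PySem.Dict.mk stored) := by
  constructor
  · intro q v hq hq1
    refine ⟨(pv_val_stored prevs stored q v hq1 hq).symm, ?_⟩
    exact pv_R_to_N prevs stored 0 q
      (List.mem_cons_of_mem _ (pv_get?_mem_fst stored q v hq))
  · intro q v hq
    exact hq

-- ----- A-side correctness -----
lemma pv_R_entry (prevs : List (Int × List Int)) (stored : List (Int × Int)) :
    ∀ k (p : Int), p ∈ pvRk prevs stored k → p ≠ 1 → p ∉ stored.map Prod.fst →
      ∃ k' < k, ∃ e ∈ prevs, e.1 = p ∧ ∀ q ∈ e.2, q ∈ pvRk prevs stored k' := by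
  intro k
  induction k with
  | zero =>
    intro p hp hp1 hps
    have hp0 : p ∈ (1 : Int) :: stored.map Prod.fst := hp
    rcases List.mem_cons.1 hp0 with h | h
    · exact absurd h hp1
    · exact absurd h hps
  | succ k ih =>
    intro p hp hp1 hps
    rcases (pv_mem_R_succ prevs stored k p).1 hp with h | ⟨e, he, hex, hq⟩
    · obtain ⟨k', hk', rest⟩ := ih p h hp1 hps
      exact ⟨k', by omega, rest⟩
    · exact ⟨k, by omega, e, he, hex, hq⟩

lemma pv_waysA (prevs : List (Int × List Int)) (stored : List (Int × Int))
    (hnd : (prevs.map Prod.fst).Nodup) :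
    ∀ k p st fuel, k < fuel → p ∈ pvRk prevs stored k → pvInv prevs stored st →
      (waysGoA fuel p (PySem.Dict.mk prevs) st).1 = pvVal prevs stored p ∧
      pvInv prevs stored (waysGoA fuel p (PySem.Dict.mk prevs) st).2 := by
  intro k
  induction k using Nat.strong_induction_on with
  | _ k ih =>
    intro p st fuel hfuel hp hinv
    obtain ⟨f, rfl⟩ : ∃ f, fuel = f + 1 := ⟨fuel - 1, by omega⟩
    by_cases hp1 : p = 1
    · subst hp1
      exact ⟨by simp [waysGoA, pv_val_one], by simpa [waysGoA] using hinv⟩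
    · cases hst : st.get? p with
      | some v =>
        refine ⟨?_, ?_⟩
        · simp only [waysGoA, if_neg hp1, hst]
          exact (hinv.1 p v hst hp1).1
        · simpa [waysGoA, if_neg hp1, hst] using hinv
      | none =>
        have hs0 : (PySem.Dict.mk stored).get? p = none := by
          cases h0 : (PySem.Dict.mk stored).get? p with
          | none => rfl
          | some w =>
            have hw := hinv.2 p w h0
            rw [hw] at hst
            exact absurd hst (by simp)
        have hps : p ∉ stored.map Prod.fst := (pv_mk_none_iff stored p).1 hs0
        obtain ⟨k', hk', e, he, hex, hq⟩ := pv_R_entry prevs stored k p hp hp1 hps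
        have hget : (PySem.Dict.mk prevs).get? p = some e.2 := by
          rw [← hex]; exact pv_get?_first prevs hnd e he
        have hgetD : (PySem.Dict.mk prevs).getD p [] = e.2 := by
          rw [PySem.Dict.getD_eq_get?_getD, hget]; rfl
        have hfold : ∀ (qs : List Int), (∀ q ∈ qs, q ∈ pvRk prevs stored k') →
            ∀ (a : Int) (st' : PySem.Dict Int Int), pvInv prevs stored st' →
            ((qs.foldl (fun acc p =>
                let res := waysGoA f p (PySem.Dict.mk prevs) acc.2
                (acc.1 + res.1, res.2)) ((a : Int), st')).1
              = a + (qs.map (pvVal prevs stored)).sum ∧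
             pvInv prevs stored
              ((qs.foldl (fun acc p =>
                let res := waysGoA f p (PySem.Dict.mk prevs) acc.2
                (acc.1 + res.1, res.2)) ((a : Int), st')).2)) := by
          intro qs
          induction qs with
          | nil => intro _ a st' hg; simpa using hg
          | cons q qs ihq =>
            intro hb a st' hg
            have h1 := ih k' hk' q st' f (by omega) (hb q List.mem_cons_self) hg
            simp only [List.foldl_cons]
            have h2 := ihq (fun r hr => hb r (List.mem_cons_of_mem _ hr))
              (a + (waysGoA f q (PySem.Dict.mk prevs) st').1)
              (waysGoA f q (PySem.Dict.mk prevs) st').2 h1.2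
            refine ⟨?_, h2.2⟩
            rw [h2.1, h1.1]
            simp [add_assoc]
        obtain ⟨hr1, hr2⟩ := hfold e.2 hq 0 st hinv
        have hval : pvVal prevs stored p = (e.2.map (pvVal prevs stored)).sum :=
          pv_val_unfold prevs stored hnd p e he hex hp1 hs0
            (fun q hq' => pv_R_to_N prevs stored k' q (hq q hq'))
        have hpN : p ∈ pvRk prevs stored prevs.length := pv_R_to_N prevs stored k p hp
        refine ⟨?_, ?_⟩
        · simp only [waysGoA, if_neg hp1, hst, hgetD]
          rw [hr1, hval, zero_add]
        · simp only [waysGoA, if_neg hp1, hst, hgetD]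
          set r := (e.2.foldl (fun acc p =>
              let res := waysGoA f p (PySem.Dict.mk prevs) acc.2
              (acc.1 + res.1, res.2)) ((0 : Int), st)) with hrdef
          have hr1' : r.1 = pvVal prevs stored p := by rw [hr1, hval, zero_add]
          constructor
          · intro q v hqv hq1
            by_cases hqp : q = p
            · subst hqp
              rw [PySem.Dict.get?_insert_self] at hqv
              injection hqv with hv
              exact ⟨by rw [← hv, hr1'], hpN⟩
            · rw [PySem.Dict.get?_insert_of_ne _ _ hqp] at hqv
              exact hr2.1 q v hqv hq1
          · intro q v hqv
            have hqp : q ≠ p := by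
              rintro rfl
              rw [hqv] at hs0
              exact absurd hs0 (by simp)
            rw [PySem.Dict.get?_insert_of_ne _ _ hqp]
            exact hr2.2 q v hqv

-- ----- B-side fold lemmas -----
lemma pv_stepB_mono (acc : PySem.Dict Int Int × Bool) (e : Int × List Int)
    (q : Int) (v : Int) (h : acc.1.get? q = some v) :
    (pvStepB acc e).1.get? q = some v := by
  unfold pvStepB
  split_ifs with hc
  · have hne : q ≠ e.1 := by
      rintro rfl
      rw [h] at hc
      exact Option.some_ne_none v hc.2.1
    rw [PySem.Dict.get?_insert_of_ne _ _ hne]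
    exact h
  · exact h

lemma pv_foldB_mono (l : List (Int × List Int)) :
    ∀ (acc : PySem.Dict Int Int × Bool) (q v : Int), acc.1.get? q = some v →
      (l.foldl pvStepB acc).1.get? q = some v := by
  induction l with
  | nil => intro acc q v h; simpa using h
  | cons a l ih =>
    intro acc q v h
    exact ih (pvStepB acc a) q v (pv_stepB_mono acc a q v h)

lemma pv_foldB_flag (l : List (Int × List Int)) :
    ∀ (acc : PySem.Dict Int Int × Bool), acc.2 = true →
      (l.foldl pvStepB acc).2 = true := by
  induction l with
  | nil => intro acc h; simpa using h
  | cons a l ih =>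
    intro acc h
    apply ih
    unfold pvStepB
    split_ifs <;> simp [h]

lemma pv_foldB_nochange (l : List (Int × List Int)) :
    ∀ (acc : PySem.Dict Int Int × Bool), (l.foldl pvStepB acc).2 = false →
      (l.foldl pvStepB acc).1 = acc.1 := by
  induction l with
  | nil => intro acc _; rfl
  | cons a l ih =>
    intro acc h
    simp only [List.foldl_cons] at h ⊢
    by_cases hc : a.1 ≠ 1 ∧ acc.1.get? a.1 = none ∧ ∀ q ∈ a.2, q = 1 ∨ acc.1.get? q ≠ none
    · exfalso
      have hstep : pvStepB acc a = (acc.1.insert a.1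
          ((a.2.map (fun q => pvValB acc.1 q)).sum), true) := by
        unfold pvStepB; rw [if_pos hc]
      rw [hstep, pv_foldB_flag l _ rfl] at h
      cases h
    · have hstep : pvStepB acc a = acc := by unfold pvStepB; rw [if_neg hc]
      rw [hstep] at h ⊢
      exact ih acc h

lemma pv_foldB_cover (l : List (Int × List Int)) :
    ∀ (acc : PySem.Dict Int Int × Bool) (e : Int × List Int), e ∈ l → e.1 ≠ 1 →
      (∀ q ∈ e.2, q = 1 ∨ acc.1.get? q ≠ none) →
      (l.foldl pvStepB acc).1.get? e.1 ≠ none := by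
  induction l with
  | nil => intro _ e he; exact absurd he (List.not_mem_nil)
  | cons a l ih =>
    intro acc e he he1 hball
    rcases List.mem_cons.1 he with rfl | hmem
    · have hstep : (pvStepB acc e).1.get? e.1 ≠ none := by
        unfold pvStepB
        split_ifs with hc
        · rw [PySem.Dict.get?_insert_self]; simp
        · intro hnone
          exact hc ⟨he1, hnone, hball⟩
      obtain ⟨v, hv⟩ := Option.ne_none_iff_exists'.mp hstep
      simp only [List.foldl_cons]
      rw [pv_foldB_mono l _ e.1 v hv]
      simp
    · simp only [List.foldl_cons]
      apply ih (pvStepB acc a) e hmem he1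
      intro q hq
      rcases hball q hq with h | h
      · exact Or.inl h
      · obtain ⟨v, hv⟩ := Option.ne_none_iff_exists'.mp h
        exact Or.inr (by rw [pv_stepB_mono acc a q v hv]; simp)

lemma pv_foldB_sound (prevs : List (Int × List Int)) (stored : List (Int × Int))
    (hnd : (prevs.map Prod.fst).Nodup) :
    ∀ (l : List (Int × List Int)), (∀ e ∈ l, e ∈ prevs) →
      ∀ (acc : PySem.Dict Int Int × Bool), pvInv prevs stored acc.1 →
        pvInv prevs stored (l.foldl pvStepB acc).1 := by
  intro l
  induction l with
  | nil => intro _ acc h; simpa using h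
  | cons a l ih =>
    intro hmem acc hinv
    simp only [List.foldl_cons]
    refine ih (fun e he => hmem e (List.mem_cons_of_mem _ he)) (pvStepB acc a) ?_
    by_cases hc : a.1 ≠ 1 ∧ acc.1.get? a.1 = none ∧ ∀ q ∈ a.2, q = 1 ∨ acc.1.get? q ≠ none
    · have hstep : pvStepB acc a = (acc.1.insert a.1
          ((a.2.map (fun q => pvValB acc.1 q)).sum), true) := by
        unfold pvStepB; rw [if_pos hc]
      rw [hstep]
      obtain ⟨h1, h2, h3⟩ := hc
      have haP : a ∈ prevs := hmem a List.mem_cons_self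
      have hqv : ∀ q ∈ a.2, pvValB acc.1 q = pvVal prevs stored q ∧
          q ∈ pvRk prevs stored prevs.length := by
        intro q hq
        by_cases hq1 : q = 1
        · subst hq1
          exact ⟨by simp [pvValB, pv_val_one], pv_one_mem prevs stored _⟩
        · rcases h3 q hq with h | h
          · exact absurd h hq1
          · obtain ⟨v, hv⟩ := Option.ne_none_iff_exists'.mp h
            obtain ⟨hvv, hqm⟩ := hinv.1 q v hv hq1
            refine ⟨?_, hqm⟩
            simp only [pvValB, if_neg hq1, PySem.Dict.getD_eq_get?_getD, hv,
              Option.getD_some]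
            exact hvv
      have hs0 : (PySem.Dict.mk stored).get? a.1 = none := by
        cases h0 : (PySem.Dict.mk stored).get? a.1 with
        | none => rfl
        | some w =>
          have hw := hinv.2 a.1 w h0
          rw [hw] at h2
          exact absurd h2 (by simp)
      have hsum : (a.2.map (fun q => pvValB acc.1 q)).sum = pvVal prevs stored a.1 := by
        rw [pv_val_unfold prevs stored hnd a.1 a haP rfl h1 hs0
          (fun q hq => (hqv q hq).2)]
        exact congrArg List.sum (List.map_congr_left (fun q hq => (hqv q hq).1))
      have haN : a.1 ∈ pvRk prevs stored prevs.length :=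
        pv_R_closed prevs stored a haP (fun q hq => (hqv q hq).2)
      constructor
      · intro q v hqv' hq1
        by_cases hqa : q = a.1
        · subst hqa
          rw [PySem.Dict.get?_insert_self] at hqv'
          injection hqv' with hv
          exact ⟨by rw [← hv, hsum], haN⟩
        · rw [PySem.Dict.get?_insert_of_ne _ _ hqa] at hqv'
          exact hinv.1 q v hqv' hq1
      · intro q v hq'
        have hacc := hinv.2 q v hq'
        have hqa : q ≠ a.1 := by
          rintro rfl
          rw [hacc] at h2
          exact absurd h2 (by simp)
        rw [PySem.Dict.get?_insert_of_ne _ _ hqa]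
        exact hacc
    · have hstep : pvStepB acc a = acc := by unfold pvStepB; rw [if_neg hc]
      rw [hstep]
      exact hinv

lemma pv_round_cover (prevs : List (Int × List Int)) (stored : List (Int × Int))
    (j : Nat) (st : PySem.Dict Int Int) (hcov : pvCov prevs stored j st) :
    pvCov prevs stored (j + 1) (pvRoundB prevs st).1 := by
  intro x hx
  rcases (pv_mem_R_succ prevs stored j x).1 hx with hx' | ⟨e, he, hex, hq⟩
  · rcases hcov x hx' with h | h
    · exact Or.inl h
    · obtain ⟨v, hv⟩ := Option.ne_none_iff_exists'.mp h
      refine Or.inr ?_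
      unfold pvRoundB
      rw [pv_foldB_mono prevs (st, false) x v hv]
      simp
  · by_cases hx1 : x = 1
    · exact Or.inl hx1
    · refine Or.inr ?_
      rw [← hex]
      unfold pvRoundB
      apply pv_foldB_cover prevs (st, false) e he (hex ▸ hx1)
      intro q hq'
      exact hcov q (hq q hq')

-- ----- B-side loop correctness -----
lemma pv_loopB_ok (prevs : List (Int × List Int)) (stored : List (Int × Int))
    (elem : Int) (hnd : (prevs.map Prod.fst).Nodup) (h1 : elem ≠ 1) :
    ∀ f j st, pvInv prevs stored st → pvCov prevs stored j st →
      elem ∈ pvRk prevs stored (j + f) →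
      (pvLoopB prevs elem f st).get? elem = some (pvVal prevs stored elem) := by
  intro f
  induction f with
  | zero =>
    intro j st hinv hcov hmem
    rw [Nat.add_zero] at hmem
    rcases hcov elem hmem with h | h
    · exact absurd h h1
    · obtain ⟨v, hv⟩ := Option.ne_none_iff_exists'.mp h
      have hvv := (hinv.1 elem v hv h1).1
      simp only [pvLoopB]
      rw [hv, hvv]
  | succ f ihf =>
    intro j st hinv hcov hmem
    simp only [pvLoopB]
    cases hst : st.get? elem with
    | some v =>
      rw [if_neg (by simp)]
      rw [hst, (hinv.1 elem v hst h1).1]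
    | none =>
      rw [if_pos rfl]
      have hinv' : pvInv prevs stored (pvRoundB prevs st).1 :=
        pv_foldB_sound prevs stored hnd prevs (fun e he => he) (st, false) hinv
      have hcov' := pv_round_cover prevs stored j st hcov
      by_cases hch : (pvRoundB prevs st).2 = true
      · rw [if_pos hch]
        refine ihf (j + 1) (pvRoundB prevs st).1 hinv' hcov' ?_
        have he : j + 1 + f = j + (f + 1) := by omega
        rw [he]
        exact hmem
      · rw [if_neg hch]
        have hflag : (pvRoundB prevs st).2 = false := by
          cases hb : (pvRoundB prevs st).2
          · rfl
          · exact absurd hb hch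
        have heq : (pvRoundB prevs st).1 = st := by
          have hn := pv_foldB_nochange prevs (st, false)
            (by simpa [pvRoundB] using hflag)
          simpa [pvRoundB] using hn
        have hcovall : ∀ i, pvCov prevs stored (j + i) st := by
          intro i
          induction i with
          | zero => exact hcov
          | succ i ihi =>
            have hc' := pv_round_cover prevs stored (j + i) st ihi
            rwa [heq] at hc'
        rcases hcovall (f + 1) elem hmem with h | h
        · exact absurd h h1
        · exact absurd hst h

-- ===== VERDICT (by name: the statement is the Claim_ definition above) =====
theorem ways_to_get_there_spec : Claim_equal_ways_to_get_there := by
  unfold Claim_equal_ways_to_get_there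
  intro elem prevs stored _ hpre
  unfold Spec_ways_to_get_there ways_to_get_there ways_to_get_there_alt
  by_cases h1 : elem = 1
  · simp [waysGoA, h1]
  · cases hst : (PySem.Dict.mk stored).get? elem with
    | some v => simp [waysGoA, h1, hst]
    | none =>
      have hnm : elem ∉ stored.map Prod.fst := (pv_mk_none_iff stored elem).1 hst
      obtain ⟨hnd, hmem⟩ : (prevs.map Prod.fst).Nodup ∧
          elem ∈ pvRk prevs stored prevs.length := by
        rcases hpre with h | h | h
        exacts [absurd h h1, absurd h hnm, h]
      have hinv0 := pv_inv_init prevs stored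
      have hA := pv_waysA prevs stored hnd prevs.length elem (PySem.Dict.mk stored)
        (prevs.length + 1) (by omega) hmem hinv0
      have hcov0 : pvCov prevs stored 0 (PySem.Dict.mk stored) := by
        intro x hx
        have hx0 : x ∈ (1 : Int) :: stored.map Prod.fst := hx
        rcases List.mem_cons.1 hx0 with h | h
        · exact Or.inl h
        · obtain ⟨v, hv⟩ := pv_mem_fst_get? stored x h
          exact Or.inr (by rw [hv]; simp)
      have hB := pv_loopB_ok prevs stored elem hnd h1 (prevs.length + 1) 0
        (PySem.Dict.mk stored) hinv0 hcov0
        (by simpa using pv_R_mono prevs stored prevs.length elem hmem)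
      rw [if_neg h1, hA.1, PySem.Dict.getD_eq_get?_getD, hB]
      rfl
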